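-- pv_equiv track=rewrite | github.com/majoporse/uni | ib111/midterm1.py | sum_missing_numbers
-- ===== SOURCE A (Python) =====
-- def sum_missing_numbers(numbers, n):
--     remaining = n
--     sum_ = 0
--     position = 0
--     current_num = 1
--     while remaining > 0:
--
--         if position < len(numbers) and numbers[position] == current_num:
--             position += 1
--
--         else:
--             remaining -= 1
--             sum_ += current_num
--         current_num += 1
--     return sum_
-- ===== SOURCE B (Python) =====
-- def sum_missing_numbers(numbers, n):
--     # Walk the strictly-increasing prefix chain of numbers, summing gaps
--     # between consecutive present values with arithmetic-series formulas.
--     remaining = n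
--     total = 0
--     cur = 1  # next candidate value
--     for x in numbers:
--         if remaining <= 0 or x < cur:
--             break
--         gap = x - cur  # missing values cur .. x-1
--         if remaining <= gap:
--             break
--         total += gap * (cur - 1) + gap * (gap + 1) // 2
--         remaining -= gap
--         cur = x + 1
--     if remaining > 0:
--         total += remaining * (cur - 1) + remaining * (remaining + 1) // 2
--     return total
-- ===== Notes on version B (the rewrite author's own statement) =====
-- stated objective: faster
-- what changed: Instead of counting up one integer at a time until n missing values are found (O(n-th missing value) iterations), B walks the strictly-increasing prefix chain of the list once and sums each gap of missing values with a closed-form arithmetic-series formula.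
import Mathlib
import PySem

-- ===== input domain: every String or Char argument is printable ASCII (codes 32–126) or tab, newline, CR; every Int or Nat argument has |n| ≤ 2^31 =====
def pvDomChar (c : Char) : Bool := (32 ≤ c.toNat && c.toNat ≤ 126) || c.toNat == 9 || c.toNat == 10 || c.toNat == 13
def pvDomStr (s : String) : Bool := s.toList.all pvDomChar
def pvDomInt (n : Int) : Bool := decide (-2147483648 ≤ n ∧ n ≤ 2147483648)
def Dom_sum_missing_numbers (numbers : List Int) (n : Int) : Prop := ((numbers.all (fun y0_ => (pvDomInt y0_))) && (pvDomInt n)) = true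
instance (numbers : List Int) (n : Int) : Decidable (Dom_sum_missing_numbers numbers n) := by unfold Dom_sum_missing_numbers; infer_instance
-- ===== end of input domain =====

-- B replaces A's value-by-value counting loop (O(n-th missing value)) by one pass over the
-- list that sums each gap of missing values with an arithmetic-series formula.

-- ===== PORT A =====
-- the while loop of A: state (remaining, sum_, position, current_num)
def aLoop (numbers : List Int) (remaining sum_ position current : Int) : Int :=
  if h : remaining > 0 then
    if hg : position < (numbers.length : Int) ∧ PySem.List.pyGet? numbers position = some current then
      aLoop numbers remaining sum_ (position + 1) (current + 1)
    else
      aLoop numbers (remaining - 1) (sum_ + current) position (current + 1)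
  else sum_
termination_by (remaining.toNat + ((numbers.length : Int) - position).toNat)
decreasing_by
  · omega
  · omega

def sum_missing_numbers (numbers : List Int) (n : Int) : Int :=
  aLoop numbers n 0 0 1

-- ===== PORT B =====
-- the for loop of B: returns the state (remaining, total, cur) at the break / end of list
def bLoop (numbers : List Int) (remaining total cur : Int) : Int × Int × Int :=
  match numbers with
  | [] => (remaining, total, cur)
  | x :: xs =>
    if remaining ≤ 0 ∨ x < cur then (remaining, total, cur)
    else
      let gap := x - cur
      if remaining ≤ gap then (remaining, total, cur)
      else bLoop xs (remaining - gap)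
             (total + gap * (cur - 1) + PySem.Int.floordiv (gap * (gap + 1)) 2) (x + 1)

def sum_missing_numbers_alt (numbers : List Int) (n : Int) : Int :=
  let r := bLoop numbers n 0 1
  if r.1 > 0 then
    r.2.1 + r.1 * (r.2.2 - 1) + PySem.Int.floordiv (r.1 * (r.1 + 1)) 2
  else r.2.1

-- ===== PRECONDITION & SPEC =====
def Spec_sum_missing_numbers (numbers : List Int) (n : Int) (out : Int) : Prop := out = sum_missing_numbers_alt numbers n
instance (numbers : List Int) (n : Int) (out : Int) : Decidable (Spec_sum_missing_numbers numbers n out) := by unfold Spec_sum_missing_numbers; infer_instance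

-- ===== CLAIM (what is proved, stated in full; the proofs are below) =====
def Claim_equal_sum_missing_numbers : Prop := ∀ (numbers : List Int) (n : Int), Dom_sum_missing_numbers numbers n → Spec_sum_missing_numbers numbers n (sum_missing_numbers numbers n)

-- ===== LEMMAS AND PROOFS =====

-- triangular-step identity: (g+1)(g+2)/2 = g(g+1)/2 + (g+1)
lemma tri_step (g : Int) : (g + 1) * ((g + 1) + 1) / 2 = g * (g + 1) / 2 + (g + 1) := by
  have h : (g + 1) * ((g + 1) + 1) = g * (g + 1) + (g + 1) * 2 := by ring
  rw [h, Int.add_mul_ediv_right _ _ (by norm_num : (2:Int) ≠ 0)]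

-- If the element at `position` can never equal the (increasing) current value while
-- remaining > 0, A just sums the next r consecutive integers starting at c.
lemma aLoop_miss (numbers : List Int) (p : Int) :
    ∀ (k : Nat) (r s c : Int), r = (k : Int) →
    (∀ c', c ≤ c' → c' < c + r → PySem.List.pyGet? numbers p ≠ some c') →
    aLoop numbers r s p c = s + r * (c - 1) + r * (r + 1) / 2 := by
  intro k
  induction k with
  | zero => intro r s c hr _; subst hr; rw [aLoop]; norm_num
  | succ m ih =>
    intro r s c hr h
    rw [aLoop]
    have hrpos : r > 0 := by omega
    rw [dif_pos hrpos]
    have hguard : ¬ (p < (numbers.length : Int) ∧ PySem.List.pyGet? numbers p = some c) := by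
      rintro ⟨-, hc⟩
      exact h c le_rfl (by omega) hc
    rw [dif_neg hguard]
    have hih := ih (r - 1) (s + c) (c + 1) (by omega)
      (fun c' h1 h2 => h c' (by omega) (by omega))
    rw [hih, show (r - 1) * ((r - 1) + 1) = (r - 1) * r from by ring]
    have ht : r * (r + 1) / 2 = (r - 1) * r / 2 + r := by
      rw [show r * (r + 1) = (r - 1) * r + r * 2 from by ring,
        Int.add_mul_ediv_right _ _ (by norm_num : (2:Int) ≠ 0)]
    rw [show (r - 1) * ((c + 1) - 1) = r * c - c from by ring]
    have hrc : r * (c - 1) = r * c - r := by ring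
    omega

-- Skipping the gap below a present value x: A performs (x - c) miss steps then one match step.
lemma aLoop_skip (numbers : List Int) (p x : Int)
    (hx : PySem.List.pyGet? numbers p = some x) :
    ∀ (k : Nat) (r s c : Int), x - c = (k : Int) → x - c < r →
    aLoop numbers r s p c =
      aLoop numbers (r - (x - c))
        (s + (x - c) * (c - 1) + (x - c) * ((x - c) + 1) / 2) (p + 1) (x + 1) := by
  intro k
  induction k with
  | zero =>
    intro r s c hk hr
    have hc : c = x := by omega
    subst hc
    have hplt : p < (numbers.length : Int) := by
      by_contra hge
      have : PySem.List.pyGet? numbers p = none := by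
        rw [PySem.List.pyGet?_eq_none_iff]
        intro hin
        unfold PySem.Raise.InRange at hin
        omega
      simp [this] at hx
    rw [aLoop, dif_pos (by omega : r > 0), dif_pos ⟨hplt, hx⟩]
    norm_num
  | succ m ih =>
    intro r s c hk hr
    rw [aLoop, dif_pos (by omega : r > 0)]
    have hguard : ¬ (p < (numbers.length : Int) ∧ PySem.List.pyGet? numbers p = some c) := by
      rintro ⟨-, hc⟩
      rw [hx] at hc
      have hxc2 : x = c := Option.some.inj hc
      omega
    rw [dif_neg hguard]
    rw [ih (r - 1) (s + c) (c + 1) (by omega) (by omega)]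
    have harg : r - 1 - (x - (c + 1)) = r - (x - c) := by ring
    rw [harg]
    congr 1
    set g : Int := x - (c + 1) with hg
    have hxc : x - c = g + 1 := by omega
    rw [hxc, tri_step g]
    have h1 : g * ((c + 1) - 1) = (g + 1) * (c - 1) - c + g + 1 := by ring
    omega

-- Main loop correspondence: A's walk from `position` equals B's gap walk over the suffix.
lemma aLoop_eq_bLoop (numbers : List Int) :
    ∀ (l : List Int) (p r s c : Int), 0 ≤ p → numbers.drop p.toNat = l →
    aLoop numbers r s p c =
      (let res := bLoop l r s c
       if res.1 > 0 then res.2.1 + res.1 * (res.2.2 - 1) + res.1 * (res.1 + 1) / 2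
       else res.2.1) := by
  intro l
  induction l with
  | nil =>
    intro p r s c hp hdrop
    have hlen : (numbers.length : Int) ≤ p := by
      have := List.drop_eq_nil_iff.mp hdrop
      omega
    have hnone : PySem.List.pyGet? numbers p = none := by
      rw [PySem.List.pyGet?_eq_none_iff]
      intro hin; unfold PySem.Raise.InRange at hin; omega
    simp only [bLoop]
    by_cases hr : r > 0
    · rw [if_pos hr]
      exact aLoop_miss numbers p r.toNat r s c (by omega)
        (fun c' _ _ hc => by simp [hnone] at hc)
    · rw [if_neg hr, aLoop, dif_neg hr]
  | cons x xs ih =>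
    intro p r s c hp hdrop
    have hplt : p.toNat < numbers.length := by
      by_contra hge
      rw [List.drop_eq_nil_iff.mpr (by omega)] at hdrop
      simp at hdrop
    have hx : PySem.List.pyGet? numbers p = some x := by
      rw [PySem.List.pyGet?_of_nonneg numbers hp]
      rw [List.getElem?_eq_getElem hplt]
      have h2 : numbers[p.toNat] :: numbers.drop (p.toNat + 1) = x :: xs :=
        (List.getElem_cons_drop hplt).trans hdrop
      exact congrArg some (by injection h2)
    simp only [bLoop]
    by_cases h1 : r ≤ 0 ∨ x < c
    · rw [if_pos h1]
      rcases h1 with h1 | h1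
      · rw [if_neg (by omega), aLoop, dif_neg (by omega)]
      · by_cases hr : r > 0
        · rw [if_pos hr]
          exact aLoop_miss numbers p r.toNat r s c (by omega)
            (fun c' hc1 _ hc => by
              rw [hx] at hc
              have hxc2 : x = c' := Option.some.inj hc
              omega)
        · rw [if_neg hr, aLoop, dif_neg hr]
    · rw [if_neg h1]
      push Not at h1
      obtain ⟨hr0, hxc⟩ := h1
      by_cases h2 : r ≤ x - c
      · rw [if_pos h2, if_pos (by omega : r > 0)]
        exact aLoop_miss numbers p r.toNat r s c (by omega)
          (fun c' hc1 hc2 hc => by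
            rw [hx] at hc
            have hxc2 : x = c' := Option.some.inj hc
            omega)
      · rw [if_neg h2]
        rw [aLoop_skip numbers p x hx (x - c).toNat r s c (by omega) (by omega)]
        have hdrop' : numbers.drop (p + 1).toNat = xs := by
          have : (p + 1).toNat = p.toNat + 1 := by omega
          rw [this, ← List.drop_drop]
          rw [hdrop]
          rfl
        rw [ih (p + 1) (r - (x - c)) _ (x + 1) (by omega) hdrop']
        have hfd : PySem.Int.floordiv ((x - c) * ((x - c) + 1)) 2 =
            (x - c) * ((x - c) + 1) / 2 :=
          PySem.Int.floordiv_eq_ediv_of_pos (by norm_num)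
        rw [hfd]

-- ===== VERDICT (by name: the statement is the Claim_ definition above) =====
theorem sum_missing_numbers_spec : Claim_equal_sum_missing_numbers := by
  intro numbers n _
  unfold Spec_sum_missing_numbers sum_missing_numbers sum_missing_numbers_alt
  rw [aLoop_eq_bLoop numbers numbers 0 n 0 1 le_rfl (by simp)]
  have hfd : ∀ a : Int, PySem.Int.floordiv a 2 = a / 2 :=
    fun a => PySem.Int.floordiv_eq_ediv_of_pos (by norm_num)
  simp only [hfd]
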